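-- pv_equiv track=rewrite | github.com/Genomics-HSE/DAIseg.mex | HMMmex.py | get_HMM_tracts
-- ===== SOURCE A (Python) =====
-- N=5
--
-- def get_HMM_tracts(seq):
--     migrating_tracts = []
--     for i in range(N):
--         migrating_tracts.append([])
--     start=0
--     for i in range(1,len(seq)):
--         if seq[i]!=seq[i-1]:
--             migrating_tracts[seq[i-1]].append([start,i-1])
--             start=i
--     migrating_tracts[seq[len(seq)-1]].append([start,len(seq)-1])
--     return migrating_tracts
-- ===== SOURCE B (Python) =====
-- from itertools import groupby
--
-- N = 5
--
-- def get_HMM_tracts(seq):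
--     migrating_tracts = [[] for _ in range(N)]
--     idx = 0
--     for key, group in groupby(seq):
--         length = sum(1 for _ in group)
--         migrating_tracts[key].append([idx, idx + length - 1])
--         idx += length
--     return migrating_tracts
-- ===== Notes on version B (the rewrite author's own statement) =====
-- stated objective: idiomatic
-- what changed: B walks contiguous runs with itertools.groupby and a running offset instead of A's index loop comparing seq[i] with seq[i-1] plus a duplicated final append.
import Mathlib
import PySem

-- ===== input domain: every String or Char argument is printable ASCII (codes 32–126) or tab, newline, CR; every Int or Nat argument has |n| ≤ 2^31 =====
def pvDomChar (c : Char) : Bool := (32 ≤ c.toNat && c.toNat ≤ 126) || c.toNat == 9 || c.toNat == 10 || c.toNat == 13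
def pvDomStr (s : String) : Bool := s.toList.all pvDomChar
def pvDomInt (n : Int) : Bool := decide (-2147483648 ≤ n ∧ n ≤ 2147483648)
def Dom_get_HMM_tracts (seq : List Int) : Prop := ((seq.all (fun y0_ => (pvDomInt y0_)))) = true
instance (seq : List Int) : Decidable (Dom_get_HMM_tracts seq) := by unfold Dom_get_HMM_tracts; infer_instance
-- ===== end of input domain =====

-- B groups the sequence into contiguous runs (groupby-style) with a running offset instead of
-- A's index loop comparing seq[i] with seq[i-1]; equally fast, more idiomatic.

-- ===== PORT A =====
-- shared primitive: Python's `buckets[v].append(t)` (negative index wraps; out of range = IndexError,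
-- excluded by Pre_, here: unchanged)
def pvAppendAt (bs : List (List (List Int))) (v : Int) (t : List Int) : List (List (List Int)) :=
  let j : Int := if v < 0 then v + bs.length else v
  if 0 ≤ j ∧ j < bs.length then bs.set j.toNat ((bs.getD j.toNat []) ++ [t]) else bs

def get_HMM_tracts (seq : List Int) : List (List (List Int)) :=
  let migrating_tracts : List (List (List Int)) :=
    (List.range 5).foldl (fun acc _ => acc ++ [([] : List (List Int))]) []
  let n : Int := seq.length
  let res := (PySem.List.pyRange 1 n 1).foldl
    (fun (st : List (List (List Int)) × Int) i =>
      if PySem.List.pyGetD seq i 0 ≠ PySem.List.pyGetD seq (i-1) 0 then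
        (pvAppendAt st.1 (PySem.List.pyGetD seq (i-1) 0) [st.2, i-1], i)
      else st)
    (migrating_tracts, 0)
  pvAppendAt res.1 (PySem.List.pyGetD seq (n-1) 0) [res.2, n-1]

-- ===== PORT B =====
-- itertools.groupby(seq): the list of (key, run length) pairs
def pvRuns (key cnt : Int) : List Int → List (Int × Int)
  | [] => [(key, cnt)]
  | y :: ys => if y = key then pvRuns key (cnt + 1) ys else (key, cnt) :: pvRuns y 1 ys

-- the `for key, group in groupby(seq)` loop with the running offset idx
def pvGoB (bs : List (List (List Int))) (idx : Int) : List (Int × Int) → List (List (List Int))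
  | [] => bs
  | (v, k) :: rs => pvGoB (pvAppendAt bs v [idx, idx + k - 1]) (idx + k) rs

def get_HMM_tracts_alt (seq : List Int) : List (List (List Int)) :=
  let migrating_tracts : List (List (List Int)) :=
    (List.range 5).map (fun _ => ([] : List (List Int)))
  match seq with
  | [] => migrating_tracts
  | x :: xs => pvGoB migrating_tracts 0 (pvRuns x 1 xs)

-- ===== PRECONDITION & SPEC =====
-- exactly where Python A returns: nonempty (else seq[len(seq)-1] raises) and every state a
-- valid bucket index of the 5-element list (Python negative indices -5..-1 wrap and are kept)
def Pre_get_HMM_tracts (seq : List Int) : Prop :=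
  seq ≠ [] ∧ ∀ v ∈ seq, -5 ≤ v ∧ v < 5
instance (seq : List Int) : Decidable (Pre_get_HMM_tracts seq) := by
  unfold Pre_get_HMM_tracts; infer_instance

def pvWitness_get_HMM_tracts : List Int := [1, 1, 0, -1, 2]

def Spec_get_HMM_tracts (seq : List Int) (out : List (List (List Int))) : Prop := out = get_HMM_tracts_alt seq
instance (seq : List Int) (out : List (List (List Int))) : Decidable (Spec_get_HMM_tracts seq out) := by unfold Spec_get_HMM_tracts; infer_instance

-- ===== CLAIM (what is proved, stated in full; the proofs are below) =====
def Claim_equal_get_HMM_tracts : Prop := ∀ (seq : List Int), Dom_get_HMM_tracts seq → Pre_get_HMM_tracts seq → Spec_get_HMM_tracts seq (get_HMM_tracts seq)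

-- ===== LEMMAS AND PROOFS =====

-- A's inner loop, restated structurally on the tail of the sequence:
-- prev = seq[i-1], i = current index, start = start of the current run
def pvLoopA (prev i start : Int) (bs : List (List (List Int))) :
    List Int → (List (List (List Int)) × Int)
  | [] => (bs, start)
  | y :: ys =>
    if y ≠ prev then pvLoopA y (i + 1) i (pvAppendAt bs prev [start, i - 1]) ys
    else pvLoopA prev (i + 1) start bs ys

-- A's index fold equals the structural loop
lemma pvL1 (S : List Int) (rest : List Int) :
    ∀ (prev : Int) (i : Nat) (bs : List (List (List Int))) (start : Int),
    1 ≤ i → S.drop (i - 1) = prev :: rest →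
    (PySem.List.pyRange (i : Int) (S.length : Int) 1).foldl
      (fun (st : List (List (List Int)) × Int) j =>
        if PySem.List.pyGetD S j 0 ≠ PySem.List.pyGetD S (j - 1) 0 then
          (pvAppendAt st.1 (PySem.List.pyGetD S (j - 1) 0) [st.2, j - 1], j)
        else st)
      (bs, start)
    = pvLoopA prev i start bs rest := by
  induction rest with
  | nil =>
    intro prev i bs start hi hdrop
    have hlen : S.length = i := by
      have := congrArg List.length hdrop
      simp [List.length_drop] at this
      omega
    rw [hlen, PySem.List.pyRange_one_eq_nil (by omega)]
    simp [pvLoopA]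
  | cons y ys ih =>
    intro prev i bs start hi hdrop
    have hlen : i < S.length := by
      have := congrArg List.length hdrop
      simp [List.length_drop] at this
      omega
    have hprev : S[i - 1]? = some prev := by
      have : (S.drop (i - 1))[0]? = some prev := by rw [hdrop]; rfl
      simpa [List.getElem?_drop] using this
    have hy : S[i]? = some y := by
      have : (S.drop (i - 1))[1]? = some y := by rw [hdrop]; rfl
      rw [List.getElem?_drop] at this
      rwa [show i - 1 + 1 = i by omega] at this
    have hgy : PySem.List.pyGetD S (i : Int) 0 = y := by
      simp [PySem.List.pyGetD_natCast, List.getD, hy]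
    have hgp : PySem.List.pyGetD S ((i : Int) - 1) 0 = prev := by
      rw [show ((i : Int) - 1) = ((i - 1 : Nat) : Int) by omega]
      simp [PySem.List.pyGetD_natCast, List.getD, hprev]
    have hdrop' : S.drop ((i + 1) - 1) = y :: ys := by
      have h := congrArg (List.drop 1) hdrop
      rw [List.drop_drop] at h
      rw [show i - 1 + 1 = i + 1 - 1 by omega] at h
      simpa using h
    rw [PySem.List.pyRange_one_cons (by exact_mod_cast hlen)]
    simp only [List.foldl_cons, hgy, hgp]
    by_cases hne : y = prev
    · rw [if_neg (by simp [hne])]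
      have H := ih prev (i + 1) bs start (by omega) (by rw [hdrop', hne])
      push_cast at H ⊢
      rw [H]
      simp [pvLoopA, hne]
    · rw [if_pos hne]
      have H := ih y (i + 1) (pvAppendAt bs prev [start, (i : Int) - 1]) (i : Int)
        (by omega) hdrop'
      push_cast at H ⊢
      rw [H]
      simp [pvLoopA, hne]

-- the structural loop plus A's final append equals B's fold over the runs
lemma pvL2 (xs : List Int) :
    ∀ (prev i start : Int) (bs : List (List (List Int))),
    pvAppendAt (pvLoopA prev i start bs xs).1 (xs.getLastD prev)
        [(pvLoopA prev i start bs xs).2, i + xs.length - 1]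
    = pvGoB bs start (pvRuns prev (i - start) xs) := by
  induction xs with
  | nil =>
    intro prev i start bs
    simp only [pvLoopA, pvRuns, pvGoB, List.getLastD, List.length_nil]
    rw [show i + ((0 : Nat) : Int) - 1 = i - 1 by push_cast; ring,
        show start + (i - start) - 1 = i - 1 by ring]
  | cons y ys ih =>
    intro prev i start bs
    by_cases hne : y = prev
    · subst hne
      simp only [pvLoopA, pvRuns, List.getLastD_cons, List.length_cons]
      rw [if_neg (by simp), if_pos trivial,
          show i + ((ys.length + 1 : Nat) : Int) - 1 = (i + 1) + (ys.length : Int) - 1 by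
            push_cast; ring,
          show i - start + 1 = (i + 1) - start by ring]
      exact ih y (i + 1) start bs
    · simp only [pvLoopA, pvRuns, List.getLastD_cons, List.length_cons]
      rw [if_pos hne, if_neg hne]
      simp only [pvGoB]
      rw [show start + (i - start) - 1 = i - 1 by ring,
          show start + (i - start) = i by ring,
          show i + ((ys.length + 1 : Nat) : Int) - 1 = (i + 1) + (ys.length : Int) - 1 by
            push_cast; ring]
      have H := ih y (i + 1) i (pvAppendAt bs prev [start, i - 1])
      rw [show i + 1 - i = (1 : Int) by ring] at H
      exact H

lemma pv_last_getD (x : Int) (xs : List Int) :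
    (x :: xs).getD xs.length 0 = xs.getLastD x := by
  induction xs generalizing x with
  | nil => rfl
  | cons y ys ih =>
    show (x :: y :: ys).getD (ys.length + 1) 0 = (y :: ys).getLastD x
    rw [List.getD_cons_succ, List.getLastD_cons]
    exact ih y

-- ===== VERDICT (by name: the statement is the Claim_ definition above) =====
theorem get_HMM_tracts_spec : Claim_equal_get_HMM_tracts := by
  intro seq _ hpre
  unfold Spec_get_HMM_tracts
  obtain ⟨hne, -⟩ := hpre
  obtain ⟨x, xs, rfl⟩ := List.exists_cons_of_ne_nil hne
  unfold get_HMM_tracts get_HMM_tracts_alt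
  simp only [List.length_cons]
  have H := pvL1 (x :: xs) xs x 1
    ((List.range 5).foldl (fun acc _ => acc ++ [([] : List (List Int))]) []) 0
    (le_refl 1) (by simp)
  simp only [List.length_cons, Nat.cast_one] at H
  rw [H]
  rw [show (((xs.length + 1 : Nat) : Int) - 1) = ((xs.length : Nat) : Int) by push_cast; ring]
  simp only [PySem.List.pyGetD_natCast]
  rw [pv_last_getD x xs]
  have H2 := pvL2 xs x 1 0
    ((List.range 5).foldl (fun acc _ => acc ++ [([] : List (List Int))]) [])
  simp only [sub_zero] at H2
  rw [show ((xs.length : Nat) : Int) = 1 + (xs.length : Int) - 1 by ring, H2]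
  rfl
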